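-- pv_equiv track=rewrite | github.com/svenwelink/AdventOfCode | 2023/day14.py | calculateColumnPoints
-- ===== SOURCE A (Python) =====
-- pillar = "#"
--
-- rock = "O"
--
-- def calculateColumnPoints(columnList):
--     columnSum, lastRockIndex, rockCount = 0, -1, 0
--
--     for i in range(len(columnList)):
--         if columnList[i] == pillar:
--             while rockCount > 0:
--                 columnSum += len(columnList) - lastRockIndex - 1
--                 rockCount -= 1
--                 lastRockIndex += 1
--             lastRockIndex = i
--         elif columnList[i] == rock:
--            rockCount += 1
--
--     while rockCount > 0:
--                 columnSum += len(columnList) - lastRockIndex - 1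
--                 rockCount -= 1
--                 lastRockIndex += 1
--
--     return(columnSum)
-- ===== SOURCE B (Python) =====
-- pillar = "#"
--
-- rock = "O"
--
-- def calculateColumnPoints(columnList):
--     n = len(columnList)
--     total, freeIndex = 0, 0
--     for i, cell in enumerate(columnList):
--         if cell == pillar:
--             freeIndex = i + 1
--         elif cell == rock:
--             total += n - freeIndex
--             freeIndex += 1
--     return total
-- ===== Notes on version B (the rewrite author's own statement) =====
-- stated objective: simpler
-- what changed: Replaces the deferred rock-count state (lastRockIndex/rockCount with a nested flush while-loop plus a trailing flush) by a single forward pass that places each rock immediately, maintaining only the next free landing slot and a running total.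
import Mathlib
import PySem

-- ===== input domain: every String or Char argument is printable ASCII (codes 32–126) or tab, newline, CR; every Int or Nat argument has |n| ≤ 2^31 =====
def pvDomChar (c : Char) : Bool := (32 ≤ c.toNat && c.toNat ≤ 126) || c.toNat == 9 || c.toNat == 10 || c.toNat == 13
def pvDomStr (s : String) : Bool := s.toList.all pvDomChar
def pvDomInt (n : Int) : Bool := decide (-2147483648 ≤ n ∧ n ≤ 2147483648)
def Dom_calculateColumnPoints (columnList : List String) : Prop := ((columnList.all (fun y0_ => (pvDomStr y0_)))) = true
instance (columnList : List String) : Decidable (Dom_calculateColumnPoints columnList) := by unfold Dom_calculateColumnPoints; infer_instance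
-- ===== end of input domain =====

-- B replaces A's deferred rockCount/lastRockIndex bookkeeping (inner flush while-loop + trailing flush)
-- by a single pass that places each rock immediately at the next free slot; objective: simpler.

-- ===== PORT A =====
-- the inner/trailing 'while rockCount > 0' loop of A, on state (columnSum, lastRockIndex, rockCount)
def pvFlush (n sum last cnt : Int) : Int × Int × Int :=
  if 0 < cnt then pvFlush n (sum + (n - last - 1)) (last + 1) (cnt - 1) else (sum, last, cnt)
termination_by cnt.toNat
decreasing_by omega

-- body of A's for-loop, on state (columnSum, lastRockIndex, rockCount) and (i, columnList[i])
def pvStepA (n : Int) (st : Int × Int × Int) (p : Int × String) : Int × Int × Int :=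
  if p.2 = "#" then
    let w := pvFlush n st.1 st.2.1 st.2.2
    (w.1, p.1, w.2.2)
  else if p.2 = "O" then (st.1, st.2.1, st.2.2 + 1)
  else st

def calculateColumnPoints (columnList : List String) : Int :=
  let n : Int := PySem.List.len columnList
  let st := (PySem.List.pyRange 0 n 1).foldl
    (fun st i => pvStepA n st (i, PySem.List.pyGetD columnList i "")) (0, -1, 0)
  (pvFlush n st.1 st.2.1 st.2.2).1

-- ===== PORT B =====
-- body of B's for-loop, on state (total, freeIndex) and (i, cell)
def pvStepB (n : Int) (st : Int × Int) (p : Int × String) : Int × Int :=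
  if p.2 = "#" then (st.1, p.1 + 1)
  else if p.2 = "O" then (st.1 + (n - st.2), st.2 + 1)
  else st

def calculateColumnPoints_alt (columnList : List String) : Int :=
  let n : Int := PySem.List.len columnList
  ((PySem.List.enumerate columnList 0).foldl (pvStepB n) (0, 0)).1

-- ===== PRECONDITION & SPEC =====
def Spec_calculateColumnPoints (columnList : List String) (out : Int) : Prop := out = calculateColumnPoints_alt columnList
instance (columnList : List String) (out : Int) : Decidable (Spec_calculateColumnPoints columnList out) := by unfold Spec_calculateColumnPoints; infer_instance

-- ===== CLAIM (what is proved, stated in full; the proofs are below) =====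
def Claim_equal_calculateColumnPoints : Prop := ∀ (columnList : List String), Dom_calculateColumnPoints columnList → Spec_calculateColumnPoints columnList (calculateColumnPoints columnList)

-- ===== LEMMAS AND PROOFS =====

lemma pvFlush_zero (n sum last : Int) : pvFlush n sum last 0 = (sum, last, 0) := by
  unfold pvFlush; simp

lemma pvFlush_snd (n : Int) (c : Nat) : ∀ sum last, (pvFlush n sum last (c : Int)).2.2 = 0 := by
  induction c with
  | zero => intro sum last; simp [pvFlush_zero]
  | succ k ih =>
    intro sum last
    rw [pvFlush]
    have h : (0 : Int) < ((k : Int) + 1) := by omega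
    simp only [Nat.cast_succ, if_pos h, add_sub_cancel_right]
    exact ih _ _

lemma pvFlush_succ (n : Int) (c : Nat) : ∀ sum last,
    (pvFlush n sum last ((c : Int) + 1)).1 = (pvFlush n sum last (c : Int)).1 + (n - (last + 1 + c)) := by
  induction c with
  | zero =>
    intro sum last
    rw [pvFlush]
    simp [pvFlush_zero]
    ring
  | succ k ih =>
    intro sum last
    rw [pvFlush]
    conv_rhs => rw [pvFlush]
    have h1 : (0 : Int) < ((k : Int) + 1 + 1) := by omega
    have h2 : (0 : Int) < ((k : Int) + 1) := by omega
    simp only [Nat.cast_succ, if_pos h1, if_pos h2, add_sub_cancel_right]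
    rw [ih]
    ring

-- loop invariant: B's (total, freeIndex) corresponds to A's (sum, last, cnt) via
-- freeIndex = last + 1 + cnt and total = sum after flushing the pending cnt rocks
lemma pv_main (n : Int) : ∀ (l : List (Int × String)) (sum last tot free : Int) (c : Nat),
    free = last + 1 + c → tot = (pvFlush n sum last (c : Int)).1 →
    (let st := l.foldl (pvStepA n) (sum, last, (c : Int));
      (pvFlush n st.1 st.2.1 st.2.2).1) = (l.foldl (pvStepB n) (tot, free)).1 := by
  intro l
  induction l with
  | nil =>
    intro sum last tot free c hf ht
    simpa using ht.symm
  | cons p l ih =>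
    intro sum last tot free c hf ht
    simp only [List.foldl_cons]
    by_cases h1 : p.2 = "#"
    · have hA : pvStepA n (sum, last, (c : Int)) p
          = ((pvFlush n sum last (c : Int)).1, p.1, ((0 : Nat) : Int)) := by
        simp [pvStepA, h1, pvFlush_snd]
      have hB : pvStepB n (tot, free) p = (tot, p.1 + 1) := by
        simp [pvStepB, h1]
      rw [hA, hB]
      exact ih _ _ _ _ 0 (by push_cast; ring) (by simp [pvFlush_zero, ht])
    · by_cases h2 : p.2 = "O"
      · have hA : pvStepA n (sum, last, (c : Int)) p = (sum, last, ((c + 1 : Nat) : Int)) := by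
          simp [pvStepA, h2]
        have hB : pvStepB n (tot, free) p = (tot + (n - free), free + 1) := by
          simp [pvStepB, h2]
        rw [hA, hB]
        refine ih _ _ _ _ (c + 1) (by push_cast; omega) ?_
        rw [show ((c + 1 : Nat) : Int) = (c : Int) + 1 by push_cast; ring, pvFlush_succ, ← ht, hf]
      · have hA : pvStepA n (sum, last, (c : Int)) p = (sum, last, (c : Int)) := by
          simp [pvStepA, h1, h2]
        have hB : pvStepB n (tot, free) p = (tot, free) := by
          simp [pvStepB, h1, h2]
        rw [hA, hB]
        exact ih _ _ _ _ c hf ht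

-- ===== VERDICT (by name: the statement is the Claim_ definition above) =====
theorem calculateColumnPoints_spec : Claim_equal_calculateColumnPoints := by
  intro columnList _
  unfold Spec_calculateColumnPoints calculateColumnPoints calculateColumnPoints_alt
  simp only []
  rw [PySem.List.enumerate_eq_map_pyRange (d := ""), List.foldl_map]
  have := pv_main (PySem.List.len columnList)
    ((PySem.List.pyRange 0 (PySem.List.len columnList) 1).map
      (fun j => (j, PySem.List.pyGetD columnList j "")))
    0 (-1) 0 0 0 (by norm_num) (by simp [pvFlush_zero])
  rw [List.foldl_map, List.foldl_map] at this
  simpa using this
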